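-- pv_equiv track=rewrite | github.com/gourman9900/6Companies30Days | Greatest Common Divisor of Strings.py | gcdofString
-- ===== SOURCE A (Python) =====
-- def gcdofString(str1,str2):
--     ans = ""
--     i,j = 0,0
--     while i < len(str1) and j < len(str2):
--         if str1[i] == str2[j]:
--             if str1[i] not in ans:ans += str1[i]
--             i += 1
--             j += 1
--         else:
--             break
--     return ans
-- ===== SOURCE B (Python) =====
-- def gcdofString(str1, str2):
--     # Binary search for the common-prefix length: slice equality is monotone in m.
--     lo, hi = 0, min(len(str1), len(str2))
--     while lo < hi:
--         mid = (lo + hi + 1) // 2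
--         if str1[:mid] == str2[:mid]:
--             lo = mid
--         else:
--             hi = mid - 1
--     # Separate pass: order-preserving dedup of the prefix.
--     return "".join(dict.fromkeys(str1[:lo]))
-- ===== Notes on version B (the rewrite author's own statement) =====
-- stated objective: faster
-- what changed: A's fused linear per-character scan (compare chars one by one, dedup on the fly with a 'not in ans' test) is replaced by a binary search on slice equality to locate the common-prefix length, followed by a separate dict.fromkeys dedup pass over the materialized prefix.
import Mathlib
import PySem

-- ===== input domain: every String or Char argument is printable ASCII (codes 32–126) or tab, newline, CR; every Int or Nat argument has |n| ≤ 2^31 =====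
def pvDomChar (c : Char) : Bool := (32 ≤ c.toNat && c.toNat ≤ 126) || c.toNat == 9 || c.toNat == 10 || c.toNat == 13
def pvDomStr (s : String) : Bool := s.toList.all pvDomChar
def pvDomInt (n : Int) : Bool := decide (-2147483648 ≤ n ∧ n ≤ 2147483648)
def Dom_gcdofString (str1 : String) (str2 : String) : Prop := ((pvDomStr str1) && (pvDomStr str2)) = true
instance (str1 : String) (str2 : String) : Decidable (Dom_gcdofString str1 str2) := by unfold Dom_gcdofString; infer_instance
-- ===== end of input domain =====

-- B replaces A's fused linear match-and-dedup scan by a binary search on slice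
-- equality for the common-prefix length plus a separate dedup pass; return values proved equal.

-- ===== PORT A =====
-- A's while loop: advance i,j in lockstep while chars match, appending unseen chars to ans.
def gcdAuxA : List Char → List Char → List Char → List Char
  | ans, a :: as, b :: bs =>
      if a == b then
        gcdAuxA (if ans.contains a then ans else ans ++ [a]) as bs
      else ans
  | ans, _, _ => ans

def gcdofString (str1 : String) (str2 : String) : String :=
  String.mk (gcdAuxA [] str1.toList str2.toList)

-- ===== PORT B =====
-- Source B's while-loop binary search on prefix-slice equality (str1[:mid] == str2[:mid])
-- (structural recursion on the fuel hi - lo, a totality device only: each loop step shrinks hi - lo)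
def bsearchB : Nat → List Char → List Char → Nat → Nat → Nat
  | 0, _, _, lo, _ => lo
  | fuel + 1, xs, ys, lo, hi =>
    if lo < hi then
      let mid := (lo + hi + 1) / 2
      if xs.take mid == ys.take mid then bsearchB fuel xs ys mid hi
      else bsearchB fuel xs ys lo (mid - 1)
    else lo

def gcdofString_alt (str1 : String) (str2 : String) : String :=
  let xs := str1.toList
  let ys := str2.toList
  let n := min xs.length ys.length
  let lo := bsearchB n xs ys 0 n
  String.mk (PySem.List.dedup (xs.take lo))

-- ===== PRECONDITION & SPEC =====
def Spec_gcdofString (str1 : String) (str2 : String) (out : String) : Prop := out = gcdofString_alt str1 str2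
instance (str1 : String) (str2 : String) (out : String) : Decidable (Spec_gcdofString str1 str2 out) := by unfold Spec_gcdofString; infer_instance

-- ===== CLAIM (what is proved, stated in full; the proofs are below) =====
def Claim_equal_gcdofString : Prop := ∀ (str1 : String) (str2 : String), Dom_gcdofString str1 str2 → Spec_gcdofString str1 str2 (gcdofString str1 str2)

-- ===== LEMMAS AND PROOFS =====

-- the mismatch-free common prefix (proof-only characterisation)
def cp : List Char → List Char → List Char
  | a :: as, b :: bs => if a = b then a :: cp as bs else []
  | _, _ => []

theorem cp_len_le (xs ys : List Char) : (cp xs ys).length ≤ min xs.length ys.length := by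
  induction xs generalizing ys with
  | nil => simp [cp]
  | cons a as ih =>
    cases ys with
    | nil => simp [cp]
    | cons b bs =>
      by_cases h : a = b
      · simpa [cp, h, Nat.succ_le_succ_iff] using ih bs
      · simp [cp, h]

theorem cp_eq_take (xs ys : List Char) : cp xs ys = xs.take (cp xs ys).length := by
  induction xs generalizing ys with
  | nil => simp [cp]
  | cons a as ih =>
    cases ys with
    | nil => simp [cp]
    | cons b bs =>
      by_cases h : a = b
      · simp [cp, h]; exact ih bs
      · simp [cp, h]

theorem take_eq_iff (xs ys : List Char) (m : Nat) (hm : m ≤ min xs.length ys.length) :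
    (xs.take m = ys.take m) ↔ m ≤ (cp xs ys).length := by
  induction xs generalizing ys m with
  | nil =>
    simp at hm
    subst hm
    simp [cp]
  | cons a as ih =>
    cases ys with
    | nil =>
      simp at hm
      subst hm
      simp [cp]
    | cons b bs =>
      cases m with
      | zero => simp
      | succ k =>
        simp only [List.take_succ_cons, List.cons.injEq]
        by_cases h : a = b
        · have := ih bs k (by simp at hm ⊢; omega)
          simp [cp, h, this]
        · simp [cp, h]

theorem bsearchB_eq (xs ys : List Char) :
    ∀ fuel lo hi, hi - lo ≤ fuel → lo ≤ (cp xs ys).length → (cp xs ys).length ≤ hi →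
      hi ≤ min xs.length ys.length → bsearchB fuel xs ys lo hi = (cp xs ys).length := by
  intro fuel
  induction fuel with
  | zero => intro lo hi hf h1 h2 _; simp [bsearchB]; omega
  | succ fuel ih =>
    intro lo hi hf h1 h2 h3
    by_cases hlt : lo < hi
    · simp only [bsearchB, hlt, if_pos]
      set mid := (lo + hi + 1) / 2 with hmid
      have hmr : lo < mid ∧ mid ≤ hi := by omega
      have hmn : mid ≤ min xs.length ys.length := le_trans hmr.2 h3
      by_cases heq : xs.take mid = ys.take mid
      · have hmp : mid ≤ (cp xs ys).length := (take_eq_iff xs ys mid hmn).mp heq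
        simp only [heq, beq_self_eq_true, if_true]
        exact ih mid hi (by omega) hmp h2 h3
      · have hmp : ¬ mid ≤ (cp xs ys).length := fun h => heq ((take_eq_iff xs ys mid hmn).mpr h)
        have hb : (xs.take mid == ys.take mid) = false := by simpa using heq
        simp only [hb, Bool.false_eq_true, if_false]
        exact ih lo (mid - 1) (by omega) h1 (by omega) (by omega)
    · simp only [bsearchB, hlt, if_neg, not_false_iff]
      omega

-- A's fused loop is the fold of Set.add over the matching prefix
theorem gcdAuxA_eq_foldl (xs ys : List Char) :
    ∀ ans, gcdAuxA ans xs ys = List.foldl PySem.Set.add ans (cp xs ys) := by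
  induction xs generalizing ys with
  | nil => intro ans; cases ys <;> simp [gcdAuxA, cp]
  | cons a as ih =>
    intro ans
    cases ys with
    | nil => simp [gcdAuxA, cp]
    | cons b bs =>
      by_cases h : a = b
      · subst h
        simp [gcdAuxA, cp, ih, PySem.Set.add]
      · simp [gcdAuxA, cp, h]

-- ===== VERDICT (by name: the statement is the Claim_ definition above) =====
theorem gcdofString_spec : Claim_equal_gcdofString := by
  intro s1 s2 _
  unfold Spec_gcdofString gcdofString gcdofString_alt
  simp only
  rw [bsearchB_eq s1.toList s2.toList _ 0 _ (by omega) (Nat.zero_le _) (cp_len_le _ _) le_rfl,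
      ← cp_eq_take, gcdAuxA_eq_foldl, PySem.List.dedup_eq_ofList, PySem.Set.ofList_eq_foldl]
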